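-- pv_equiv track=rewrite | github.com/jemtca/CodingBat | Python/List-2/have_three.py | have_three
-- ===== SOURCE A (Python) =====
-- def have_three(nums):
--     b = True
--     found = False
--     count = 0
--
--     i = 0
--     while i < len(nums) and not found:
--         if i < len(nums) - 1 and nums[i] == 3 and nums[i+1] == 3:
--             found = True
--         elif nums[i] == 3:
--             count += 1
--         i += 1
--
--     if count != 3:
--         b = False
--
--     return b
-- ===== SOURCE B (Python) =====
-- def have_three(nums):
--     # locate the stop index: first left index of an adjacent 3,3 pair, else len(nums)
--     p = len(nums)
--     for i in range(len(nums) - 1):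
--         if nums[i] == 3 and nums[i + 1] == 3:
--             p = i
--             break
--     return nums[:p].count(3) == 3
-- ===== Notes on version B (the rewrite author's own statement) =====
-- stated objective: simpler
-- what changed: Replaces the stateful while loop with three flags by a two-phase computation: find the left index of the first adjacent 3,3 pair (or len), then compare the count of 3s in the prefix before it with 3; the counting moves into the C-level slice/count builtins.
import Mathlib
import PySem

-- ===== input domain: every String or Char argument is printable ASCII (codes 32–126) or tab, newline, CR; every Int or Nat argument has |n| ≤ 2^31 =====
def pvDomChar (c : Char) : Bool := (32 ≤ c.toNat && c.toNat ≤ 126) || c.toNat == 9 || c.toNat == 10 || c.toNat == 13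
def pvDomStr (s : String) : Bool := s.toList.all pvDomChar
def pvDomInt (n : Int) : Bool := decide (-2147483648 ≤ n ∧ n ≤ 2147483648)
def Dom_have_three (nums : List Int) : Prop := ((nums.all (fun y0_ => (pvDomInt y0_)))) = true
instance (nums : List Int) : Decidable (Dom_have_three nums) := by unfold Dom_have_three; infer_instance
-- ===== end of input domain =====

-- B replaces A's stateful while loop (flags b/found plus a running count) by a two-phase
-- decomposition: find the left index of the first adjacent 3,3 pair (or len), then count 3s
-- in the prefix before it; objective: simpler.


-- ===== PORT A =====
-- the while loop: state (i, found, count); indices are in range whenever read, so xs[i] = getD i 0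
def have_three_loop (nums : List Int) (i : Nat) (found : Bool) (count : Int) : Bool × Int :=
  if i < nums.length ∧ found = false then
    if i + 1 < nums.length ∧ nums.getD i 0 = 3 ∧ nums.getD (i+1) 0 = 3 then
      have_three_loop nums (i+1) true count
    else if nums.getD i 0 = 3 then
      have_three_loop nums (i+1) found (count + 1)
    else
      have_three_loop nums (i+1) found count
  else (found, count)
termination_by nums.length - i
decreasing_by all_goals omega

def have_three (nums : List Int) : Bool :=
  let st := have_three_loop nums 0 false 0
  if st.2 ≠ 3 then false else true

-- ===== PORT B =====
-- the for-loop with break: first i with nums[i]==3 and nums[i+1]==3, default len(nums)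
def have_three_findPair (nums : List Int) (i : Nat) : Nat :=
  if i + 1 < nums.length then
    if nums.getD i 0 = 3 ∧ nums.getD (i+1) 0 = 3 then i
    else have_three_findPair nums (i+1)
  else nums.length
termination_by nums.length - i
decreasing_by all_goals omega

def have_three_alt (nums : List Int) : Bool :=
  let p := have_three_findPair nums 0
  ((nums.take p).count 3 : Int) == 3   -- nums[:p] with 0 ≤ p = take p

-- ===== PRECONDITION & SPEC =====
def Spec_have_three (nums : List Int) (out : Bool) : Prop := out = have_three_alt nums
instance (nums : List Int) (out : Bool) : Decidable (Spec_have_three nums out) := by unfold Spec_have_three; infer_instance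

-- ===== CLAIM (what is proved, stated in full; the proofs are below) =====
def Claim_equal_have_three : Prop := ∀ (nums : List Int), Dom_have_three nums → Spec_have_three nums (have_three nums)

-- ===== LEMMAS AND PROOFS =====

theorem findPair_ge (nums : List Int) (i : Nat) (hle : i ≤ nums.length) :
    i ≤ have_three_findPair nums i := by
  induction i using have_three_findPair.induct nums with
  | case1 i h h2 => rw [have_three_findPair, if_pos h, if_pos h2]
  | case2 i h h2 ih =>
    rw [have_three_findPair, if_pos h, if_neg h2]
    have := ih (by omega); omega
  | case3 i h => rw [have_three_findPair, if_neg h]; omega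

theorem loop_eq_count (nums : List Int) (i : Nat) (c : Int) :
    (have_three_loop nums i false c).2
      = c + (((nums.drop i).take (have_three_findPair nums i - i)).count 3 : Int) := by
  induction i using have_three_findPair.induct nums generalizing c with
  | case1 i h h2 =>
    rw [have_three_findPair, if_pos h, if_pos h2]
    rw [have_three_loop, if_pos ⟨by omega, rfl⟩, if_pos ⟨h, h2.1, h2.2⟩]
    rw [have_three_loop, if_neg (by simp)]
    rw [Nat.sub_self, List.take_zero]
    norm_num
  | case2 i h h2 ih =>
    rw [have_three_findPair, if_pos h, if_neg h2]
    have hge := findPair_ge nums (i+1) (by omega)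
    have hdrop : nums.drop i = nums.getD i 0 :: nums.drop (i+1) := by
      rw [List.drop_eq_getElem_cons (by omega : i < nums.length),
          List.getD_eq_getElem?_getD, List.getElem?_eq_getElem (by omega)]
      rfl
    rw [have_three_loop, if_pos ⟨by omega, rfl⟩,
        if_neg (fun hc => h2 ⟨hc.2.1, hc.2.2⟩)]
    have htake : (nums.drop i).take (have_three_findPair nums (i+1) - i)
        = nums.getD i 0 :: (nums.drop (i+1)).take (have_three_findPair nums (i+1) - (i+1)) := by
      rw [hdrop]
      have : have_three_findPair nums (i+1) - i = (have_three_findPair nums (i+1) - (i+1)) + 1 := by omega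
      rw [this, List.take_succ_cons]
    by_cases h3 : nums.getD i 0 = 3
    · rw [if_pos h3, ih, htake, h3]
      simp; ring
    · rw [if_neg h3, ih, htake, List.count_cons]
      rw [List.getD_eq_getElem?_getD] at h3
      simp [h3]
  | case3 i h =>
    rw [have_three_findPair, if_neg h]
    by_cases hi : i < nums.length
    · have hi' : i = nums.length - 1 := by omega
      have hdrop : nums.drop i = [nums.getD i 0] := by
        rw [List.getD_eq_getElem?_getD, List.getElem?_eq_getElem hi]
        have := List.drop_eq_getElem_cons hi
        rw [this]
        have : nums.drop (i+1) = [] := List.drop_eq_nil_of_le (by omega)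
        simp [this]
      have h1 : nums.length - i = 1 := by omega
      rw [have_three_loop, if_pos ⟨hi, rfl⟩, if_neg (fun hc => absurd hc.1 h)]
      by_cases h3 : nums.getD i 0 = 3
      · rw [if_pos h3, have_three_loop, if_neg (by omega)]
        rw [List.getD_eq_getElem?_getD] at h3
        simp [hdrop, h1, h3, List.getD_eq_getElem?_getD]
      · rw [if_neg h3, have_three_loop, if_neg (by omega)]
        rw [List.getD_eq_getElem?_getD] at h3
        simp [hdrop, h1, h3, List.getD_eq_getElem?_getD]
    · rw [have_three_loop, if_neg (by omega)]
      simp [List.drop_eq_nil_of_le (by omega : nums.length ≤ i)]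

-- ===== VERDICT (by name: the statement is the Claim_ definition above) =====
theorem have_three_spec : Claim_equal_have_three := by
  intro nums _
  unfold Spec_have_three have_three have_three_alt
  have h := loop_eq_count nums 0 0
  simp only [List.drop_zero, Nat.sub_zero, zero_add] at h
  simp only [h]
  by_cases he : ((nums.take (have_three_findPair nums 0)).count 3 : Int) = 3
  · simp [he]
  · simp [he]
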